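-- pv_equiv track=rewrite | github.com/mace141/Notes | Data Structures & Algorithms/structy.py | rare_route
-- ===== SOURCE A (Python) =====
-- def rare_route(graph, node, visited, last_node):
--   if node in visited:
--     return False
--
--   visited.add(node)
--   for neighbor in graph[node]:
--     if neighbor != last_node and not rare_route(graph, neighbor, visited, node):
--       return False
--
--   return True
-- ===== SOURCE B (Python) =====
-- def rare_route(graph, node, visited, last_node):
--   stack = [(node, last_node)]
--   while stack:
--     cur, parent = stack.pop()
--     if cur in visited:
--       return False
--     visited.add(cur)
--     for neighbor in reversed(graph[cur]):
--       if neighbor != parent: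
--         stack.append((neighbor, cur))
--   return True
-- ===== Notes on version B (the rewrite author's own statement) =====
-- stated objective: alternative
-- what changed: The recursive DFS (one Python call frame per node, False propagated up through the call stack) is replaced by an iterative DFS over an explicit stack of (node, parent) pairs that visits nodes in the same preorder and returns False at the first revisited pop, avoiding Python call-stack depth limits.
-- outside the precondition, e.g. on rare_route({'a': ['z']}, 'a', set(), 'z'): A returns True, B returns True; on rare_route({'a': ['a', 'z']}, 'a', set(), None): A returns False, B returns False
import Mathlib
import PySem

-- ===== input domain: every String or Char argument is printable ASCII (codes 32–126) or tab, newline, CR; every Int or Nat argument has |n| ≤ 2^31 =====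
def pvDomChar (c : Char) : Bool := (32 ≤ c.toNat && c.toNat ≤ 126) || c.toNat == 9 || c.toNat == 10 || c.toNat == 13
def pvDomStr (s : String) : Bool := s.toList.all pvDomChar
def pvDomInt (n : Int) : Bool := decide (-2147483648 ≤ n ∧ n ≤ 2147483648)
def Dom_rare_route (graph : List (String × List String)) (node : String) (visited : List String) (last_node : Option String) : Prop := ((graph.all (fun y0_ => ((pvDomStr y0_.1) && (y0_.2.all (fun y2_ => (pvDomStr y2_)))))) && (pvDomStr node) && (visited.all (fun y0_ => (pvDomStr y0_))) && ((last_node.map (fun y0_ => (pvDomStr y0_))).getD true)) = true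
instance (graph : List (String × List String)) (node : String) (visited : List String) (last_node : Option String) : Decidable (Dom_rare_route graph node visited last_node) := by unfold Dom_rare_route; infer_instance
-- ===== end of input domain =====

-- B replaces A's recursive DFS by an iterative DFS over an explicit (node, parent) stack, same preorder,
-- False at the first revisited pop (alternative decomposition, same cost). Both A and B mutate the caller's
-- `visited` set identically (same visit order); the equivalence proved here is about the return value.
-- Both ports carry a Nat fuel argument as a pure totality guard (recursion depth / number of visits is
-- bounded by the number of unvisited keys, ≤ graph.length); the fuel-exhaustion branch is unreachable.

-- ===== PORT A =====
-- the for-loop of A over the neighbour list: `step nb v` is the recursive call rare_route(graph, nb, v, node)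
def rareList (step : String → List String → Bool × List String) (nbrs : List String) (visited : List String) (last_node : Option String) : Bool × List String :=
  match nbrs with
  | [] => (true, visited)
  | neighbor :: rest =>
    if some neighbor ≠ last_node then
      if (step neighbor visited).1 = false then (false, (step neighbor visited).2)
      else rareList step rest (step neighbor visited).2 last_node
    else rareList step rest visited last_node

def rareAux (graph : List (String × List String)) (fuel : Nat) (node : String) (visited : List String) (last_node : Option String) : Bool × List String :=
  if visited.contains node then (false, visited)
  else
    let visited' := PySem.Set.add visited node
    match (PySem.Dict.mk graph).get? node with
    | none => (false, visited')      -- Python raises KeyError here (excluded by Pre_)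
    | some nbrs =>
      match fuel with
      | 0 => (false, visited')       -- fuel guard, unreachable (see header comment)
      | fuel' + 1 => rareList (fun nb v => rareAux graph fuel' nb v (some node)) nbrs visited' last_node
termination_by fuel

def rare_route (graph : List (String × List String)) (node : String) (visited : List String) (last_node : Option String) : Bool :=
  (rareAux graph (graph.length + 1) node visited last_node).1

-- ===== PORT B =====
def rareLoop (graph : List (String × List String)) (fuel : Nat) (stack : List (String × Option String)) (visited : List String) : Bool :=
  match stack with
  | [] => true
  | (cur, parent) :: rest =>
    if visited.contains cur then false
    else
      let visited' := PySem.Set.add visited cur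
      match (PySem.Dict.mk graph).get? cur with
      | none => false                -- Python raises KeyError here (excluded by Pre_)
      | some nbrs =>
        match fuel with
        | 0 => false                 -- fuel guard, unreachable (see header comment)
        | fuel' + 1 =>
          rareLoop graph fuel'
            (nbrs.reverse.foldl (fun st nb => if some nb ≠ parent then (nb, some cur) :: st else st) rest)
            visited'
termination_by fuel

def rare_route_alt (graph : List (String × List String)) (node : String) (visited : List String) (last_node : Option String) : Bool :=
  rareLoop graph (graph.length + 1) [(node, last_node)] visited

-- ===== PRECONDITION & SPEC =====
-- Pre_ excludes the inputs on which A raises KeyError (a looked-up node missing from graph). It is a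
-- conservative closed form: it also excludes some inputs on which A returns, namely graphs listing a
-- non-key, non-visited neighbour that the traversal never actually looks up (skipped as the parent, or
-- unreached after an early False).
def Pre_rare_route (graph : List (String × List String)) (node : String) (visited : List String) (last_node : Option String) : Prop :=
  node ∈ visited ∨ (node ∈ graph.map Prod.fst ∧ ∀ p ∈ graph, ∀ v ∈ p.2, v ∈ graph.map Prod.fst ∨ v ∈ visited)
instance (graph : List (String × List String)) (node : String) (visited : List String) (last_node : Option String) : Decidable (Pre_rare_route graph node visited last_node) := by unfold Pre_rare_route; infer_instance

def pvWitness_rare_route : (List (String × List String)) × String × List String × Option String :=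
  ([("a", ["b"]), ("b", ["a"])], "a", [], none)

def Spec_rare_route (graph : List (String × List String)) (node : String) (visited : List String) (last_node : Option String) (out : Bool) : Prop := out = rare_route_alt graph node visited last_node
instance (graph : List (String × List String)) (node : String) (visited : List String) (last_node : Option String) (out : Bool) : Decidable (Spec_rare_route graph node visited last_node out) := by unfold Spec_rare_route; infer_instance

-- ===== CLAIM (what is proved, stated in full; the proofs are below) =====
def Claim_equal_rare_route : Prop := ∀ (graph : List (String × List String)) (node : String) (visited : List String) (last_node : Option String), Dom_rare_route graph node visited last_node → Pre_rare_route graph node visited last_node → Spec_rare_route graph node visited last_node (rare_route graph node visited last_node)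

-- ===== LEMMAS AND PROOFS =====

-- number of (occurrences of) keys of `graph` not yet in `vis`: the fuel measure
def muV (graph : List (String × List String)) (vis : List String) : Nat :=
  ((graph.map Prod.fst).filter (fun k => !vis.contains k)).length

-- `w` has every element of `v`
def SubV (v w : List String) : Prop := ∀ x, x ∈ v → x ∈ w

theorem subV_refl (v : List String) : SubV v v := fun _ h => h

theorem subV_trans {u v w : List String} (h1 : SubV u v) (h2 : SubV v w) : SubV u w :=
  fun x hx => h2 x (h1 x hx)

theorem subV_add (v : List String) (x : String) : SubV v (PySem.Set.add v x) := by
  intro y hy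
  rw [PySem.Set.mem_add]
  exact Or.inl hy

theorem filter_len_mono {α : Type} (l : List α) (p q : α → Bool) (h : ∀ x, p x = true → q x = true) :
    (l.filter p).length ≤ (l.filter q).length := by
  induction l with
  | nil => simp
  | cons a t ih =>
    rw [List.filter_cons, List.filter_cons]
    by_cases hp : p a = true
    · rw [if_pos hp, if_pos (h a hp)]
      simpa using ih
    · rw [if_neg hp]
      split
      · simp; omega
      · exact ih

theorem mu_mono {graph : List (String × List String)} {v w : List String} (h : SubV v w) :
    muV graph w ≤ muV graph v := by
  apply filter_len_mono
  intro x hx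
  simp only [List.contains_eq_mem, Bool.not_eq_true', decide_eq_false_iff_not] at hx ⊢
  exact fun hv => hx (h x hv)

theorem filter_len_strict {α : Type} (l : List α) (p q : α → Bool) (a : α)
    (ha : a ∈ l) (hpa : p a = false) (hqa : q a = true) (h : ∀ x, p x = true → q x = true) :
    (l.filter p).length < (l.filter q).length := by
  induction l with
  | nil => simp at ha
  | cons b t ih =>
    rw [List.filter_cons, List.filter_cons]
    rcases List.mem_cons.1 ha with rfl | hmem
    · rw [if_neg (by simp [hpa]), if_pos hqa]
      exact Nat.lt_succ_of_le (by simpa using filter_len_mono t p q h)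
    · by_cases hp : p b = true
      · rw [if_pos hp, if_pos (h b hp)]
        simpa using ih hmem
      · rw [if_neg hp]
        split
        · simp
          exact Nat.le_of_lt (ih hmem)
        · exact ih hmem

theorem mem_keys_of_get?_some {graph : List (String × List String)} {node : String} {nbrs : List String}
    (h : (PySem.Dict.mk graph).get? node = some nbrs) : node ∈ graph.map Prod.fst := by
  by_contra hmem
  have h0 : (PySem.Dict.mk graph).get? node = none := by
    rw [PySem.Dict.get?_eq_none_iff_not_mem_keys]
    simpa [PySem.Dict.keys_mk] using hmem
  simp [h] at h0

theorem mu_add_lt {graph : List (String × List String)} {vis : List String} {node : String} {nbrs : List String}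
    (hc : vis.contains node = false) (hget : (PySem.Dict.mk graph).get? node = some nbrs) :
    muV graph (PySem.Set.add vis node) < muV graph vis := by
  have hnm : node ∉ vis := by simpa [List.contains_eq_mem] using hc
  apply filter_len_strict _ _ _ node (mem_keys_of_get?_some hget)
  · simp [List.contains_eq_mem]
  · simp [List.contains_eq_mem, hnm]
  · intro x hx
    simp only [List.contains_eq_mem, Bool.not_eq_true', decide_eq_false_iff_not] at hx ⊢
    exact fun hv => hx (subV_add vis node x hv)

theorem mu_le (graph : List (String × List String)) (vis : List String) :
    muV graph vis ≤ graph.length := by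
  calc muV graph vis ≤ (graph.map Prod.fst).length := List.length_filter_le _ _
    _ = graph.length := List.length_map ..

-- the loop body of A preserves SubV
theorem rlSub (step : String → List String → Bool × List String)
    (hstep : ∀ nb v, SubV v (step nb v).2) :
    ∀ (nbrs : List String) (vis : List String) (ln : Option String),
      SubV vis (rareList step nbrs vis ln).2 := by
  intro nbrs
  induction nbrs with
  | nil => intro vis ln; exact subV_refl vis
  | cons nb rest ih =>
    intro vis ln
    rw [rareList]
    split
    · split
      · exact hstep nb vis
      · exact subV_trans (hstep nb vis) (ih _ ln)
    · exact ih vis ln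

theorem rlCongr (step1 step2 : String → List String → Bool × List String) (vis0 : List String)
    (hsub : ∀ nb v, SubV v (step1 nb v).2)
    (h : ∀ nb v, SubV vis0 v → step1 nb v = step2 nb v) :
    ∀ (nbrs : List String) (vis : List String) (ln : Option String),
      SubV vis0 vis → rareList step1 nbrs vis ln = rareList step2 nbrs vis ln := by
  intro nbrs
  induction nbrs with
  | nil => intro vis ln _; rfl
  | cons nb rest ih =>
    intro vis ln hvis
    rw [rareList, rareList]
    split
    · rw [← h nb vis hvis]
      split
      · rfl
      · exact ih _ ln (subV_trans hvis (hsub nb vis))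
    · exact ih vis ln hvis

theorem raSub (graph : List (String × List String)) :
    ∀ (fuel : Nat) (node : String) (vis : List String) (ln : Option String),
      SubV vis (rareAux graph fuel node vis ln).2 := by
  intro fuel
  induction fuel with
  | zero =>
    intro node vis ln
    rw [rareAux]
    split
    · exact subV_refl vis
    · split
      · exact subV_add vis node
      · exact subV_add vis node
  | succ f ih =>
    intro node vis ln
    rw [rareAux]
    split
    · exact subV_refl vis
    · split
      · exact subV_add vis node
      · exact subV_trans (subV_add vis node) (rlSub _ (fun nb v => ih nb v (some node)) _ _ ln)

theorem mu_pos {graph : List (String × List String)} {vis : List String} {node : String} {nbrs : List String}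
    (hc : vis.contains node = false) (hget : (PySem.Dict.mk graph).get? node = some nbrs) :
    1 ≤ muV graph vis := by
  have := mu_add_lt hc hget
  omega

theorem raSuff (graph : List (String × List String)) :
    ∀ (f g : Nat) (node : String) (vis : List String) (ln : Option String),
      muV graph vis ≤ f → muV graph vis ≤ g →
      rareAux graph f node vis ln = rareAux graph g node vis ln := by
  intro f
  induction f with
  | zero =>
    intro g node vis ln hf hg
    rw [rareAux, rareAux]
    split
    · rfl
    · rename_i hc
      cases hget : (PySem.Dict.mk graph).get? node with
      | none => rfl
      | some nbrs =>
        exact absurd (mu_pos (by simpa using hc) hget) (by omega)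
  | succ f ih =>
    intro g node vis ln hf hg
    cases g with
    | zero =>
      rw [rareAux, rareAux]
      split
      · rfl
      · rename_i hc
        cases hget : (PySem.Dict.mk graph).get? node with
        | none => rfl
        | some nbrs =>
          exact absurd (mu_pos (by simpa using hc) hget) (by omega)
    | succ g' =>
      rw [rareAux, rareAux]
      split
      · rfl
      · rename_i hc
        cases hget : (PySem.Dict.mk graph).get? node with
        | none => rfl
        | some nbrs =>
          simp only
          apply rlCongr _ _ (PySem.Set.add vis node)
            (fun nb v => raSub graph f nb v (some node))
          · intro nb v hv
            have h1 : muV graph v ≤ muV graph (PySem.Set.add vis node) := mu_mono hv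
            have h2 := mu_add_lt (by simpa using hc) hget
            exact ih g' nb v (some node) (by omega) (by omega)
          · exact subV_refl _

theorem loopSuff (graph : List (String × List String)) :
    ∀ (f g : Nat) (stack : List (String × Option String)) (vis : List String),
      muV graph vis ≤ f → muV graph vis ≤ g →
      rareLoop graph f stack vis = rareLoop graph g stack vis := by
  intro f
  induction f with
  | zero =>
    intro g stack vis hf hg
    cases stack with
    | nil => rw [rareLoop.eq_def, rareLoop.eq_def]
    | cons top rest =>
      obtain ⟨cur, parent⟩ := top
      rw [rareLoop.eq_def, rareLoop.eq_def]
      dsimp only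
      split
      · rfl
      · rename_i hc
        cases hget : (PySem.Dict.mk graph).get? cur with
        | none => rfl
        | some nbrs =>
          exact absurd (mu_pos (by simpa using hc) hget) (by omega)
  | succ f ih =>
    intro g stack vis hf hg
    cases g with
    | zero =>
      cases stack with
      | nil => rw [rareLoop.eq_def, rareLoop.eq_def]
      | cons top rest =>
        obtain ⟨cur, parent⟩ := top
        rw [rareLoop.eq_def, rareLoop.eq_def]
        dsimp only
        split
        · rfl
        · rename_i hc
          cases hget : (PySem.Dict.mk graph).get? cur with
          | none => rfl
          | some nbrs =>
            exact absurd (mu_pos (by simpa using hc) hget) (by omega)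
    | succ g' =>
      cases stack with
      | nil => rw [rareLoop.eq_def, rareLoop.eq_def]
      | cons top rest =>
        obtain ⟨cur, parent⟩ := top
        rw [rareLoop.eq_def, rareLoop.eq_def]
        dsimp only
        split
        · rfl
        · rename_i hc
          cases hget : (PySem.Dict.mk graph).get? cur with
          | none => rfl
          | some nbrs =>
            have h2 := mu_add_lt (hc := by simpa using hc) hget
            exact ih g' _ _ (by omega) (by omega)

theorem push_eq (nbrs : List String) (parent : Option String) (cur : String)
    (rest : List (String × Option String)) :
    nbrs.reverse.foldl (fun st nb => if some nb ≠ parent then (nb, some cur) :: st else st) rest =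
      (nbrs.filter (fun nb => decide (some nb ≠ parent))).map (fun nb => (nb, some cur)) ++ rest := by
  rw [List.foldl_reverse]
  induction nbrs with
  | nil => rfl
  | cons nb tl ih =>
    rw [List.foldr_cons, ih, List.filter_cons]
    by_cases h : some nb ≠ parent
    · rw [if_pos h, if_pos (by simpa using h)]
      rfl
    · rw [if_neg h, if_neg (by simpa using h)]

theorem listBridge (graph : List (String × List String)) (K : Nat)
    (IH : ∀ (vis : List String), muV graph vis ≤ K → ∀ (node : String) (parent : Option String)
        (rest : List (String × Option String)),
        rareLoop graph (muV graph vis) ((node, parent) :: rest) vis =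
          (if (rareAux graph (muV graph vis) node vis parent).1 then
            rareLoop graph (muV graph (rareAux graph (muV graph vis) node vis parent).2) rest
              (rareAux graph (muV graph vis) node vis parent).2
          else false)) :
    ∀ (nbrs : List String) (vis : List String) (rest : List (String × Option String))
      (cur : String) (cmp : Option String), muV graph vis ≤ K →
      rareLoop graph (muV graph vis)
          ((nbrs.filter (fun nb => decide (some nb ≠ cmp))).map (fun nb => (nb, some cur)) ++ rest) vis =
        (if (rareList (fun nb v => rareAux graph (muV graph v) nb v (some cur)) nbrs vis cmp).1 then
          rareLoop graph
            (muV graph (rareList (fun nb v => rareAux graph (muV graph v) nb v (some cur)) nbrs vis cmp).2)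
            rest
            (rareList (fun nb v => rareAux graph (muV graph v) nb v (some cur)) nbrs vis cmp).2
        else false) := by
  intro nbrs
  induction nbrs with
  | nil =>
    intro vis rest cur cmp hK
    rw [rareList.eq_def]
    simp
  | cons nb tl ih =>
    intro vis rest cur cmp hK
    by_cases hcmp : some nb ≠ cmp
    · rw [List.filter_cons, if_pos (by simpa using hcmp), List.map_cons, List.cons_append]
      rw [IH vis hK nb (some cur) _]
      rw [rareList, if_pos hcmp]
      cases hr : (rareAux graph (muV graph vis) nb vis (some cur)).1 with
      | false => simp
      | true =>
        rw [if_pos (rfl : true = true), if_neg (by simp : ¬(true = false))]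
        exact ih _ rest cur cmp
          (le_trans (mu_mono (raSub graph (muV graph vis) nb vis (some cur))) hK)
    · rw [List.filter_cons, if_neg (by simpa using hcmp)]
      rw [ih vis rest cur cmp hK]
      rw [rareList, if_neg hcmp]

theorem bridge (graph : List (String × List String)) :
    ∀ (K : Nat) (vis : List String), muV graph vis ≤ K →
      ∀ (node : String) (parent : Option String) (rest : List (String × Option String)),
        rareLoop graph (muV graph vis) ((node, parent) :: rest) vis =
          (if (rareAux graph (muV graph vis) node vis parent).1 then
            rareLoop graph (muV graph (rareAux graph (muV graph vis) node vis parent).2) rest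
              (rareAux graph (muV graph vis) node vis parent).2
          else false) := by
  intro K
  induction K with
  | zero =>
    intro vis hK node parent rest
    rw [rareLoop.eq_def, rareAux]
    dsimp only
    split
    · simp
    · rename_i hc
      cases hget : (PySem.Dict.mk graph).get? node with
      | none => simp
      | some nbrs =>
        exact absurd (mu_pos (by simpa using hc) hget) (by omega)
  | succ K' ihK =>
    intro vis hK node parent rest
    rw [rareLoop.eq_def]
    dsimp only
    by_cases hc : vis.contains node = true
    · rw [if_pos hc]
      have hra : rareAux graph (muV graph vis) node vis parent = (false, vis) := by
        rw [rareAux, if_pos hc]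
      rw [hra]
      simp
    · rw [if_neg hc]
      cases hget : (PySem.Dict.mk graph).get? node with
      | none =>
        dsimp only
        have hra : rareAux graph (muV graph vis) node vis parent = (false, PySem.Set.add vis node) := by
          rw [rareAux, if_neg hc]
          dsimp only
          rw [hget]
        rw [hra]
        simp
      | some nbrs =>
        have hcf : vis.contains node = false := by simpa using hc
        have hlt := mu_add_lt (hc := hcf) hget
        have hpos := mu_pos (hc := hcf) hget
        obtain ⟨m, hm⟩ : ∃ m, muV graph vis = m + 1 := ⟨muV graph vis - 1, by omega⟩
        have hle : muV graph (PySem.Set.add vis node) ≤ m := by omega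
        have hKle : muV graph (PySem.Set.add vis node) ≤ K' := by omega
        have hra : rareAux graph (muV graph vis) node vis parent =
            rareList (fun nb v => rareAux graph m nb v (some node)) nbrs (PySem.Set.add vis node) parent := by
          rw [rareAux, if_neg hc]
          dsimp only
          rw [hget, hm]
        have hcongr := rlCongr (fun nb v => rareAux graph m nb v (some node))
          (fun nb v => rareAux graph (muV graph v) nb v (some node)) (PySem.Set.add vis node)
          (fun nb v => raSub graph m nb v (some node))
          (fun nb v hv => raSuff graph m (muV graph v) nb v (some node)
            (le_trans (mu_mono hv) hle) le_rfl)
          nbrs (PySem.Set.add vis node) parent (subV_refl _)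
        dsimp only
        rw [hm] at hra ⊢
        dsimp only
        rw [push_eq]
        rw [loopSuff graph m (muV graph (PySem.Set.add vis node)) _ _ hle le_rfl]
        rw [hra, hcongr]
        exact listBridge graph K' ihK nbrs (PySem.Set.add vis node) rest node parent hKle

theorem main_eq (graph : List (String × List String)) (node : String) (visited : List String)
    (last_node : Option String) :
    rare_route graph node visited last_node = rare_route_alt graph node visited last_node := by
  unfold rare_route rare_route_alt
  have hb : muV graph visited ≤ graph.length + 1 := le_trans (mu_le graph visited) (by omega)
  rw [raSuff graph (graph.length + 1) (muV graph visited) node visited last_node hb le_rfl]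
  rw [loopSuff graph (graph.length + 1) (muV graph visited) [(node, last_node)] visited hb le_rfl]
  rw [bridge graph (muV graph visited) visited le_rfl node last_node []]
  cases hr : (rareAux graph (muV graph visited) node visited last_node).1 with
  | false => simp
  | true => simp [rareLoop]

-- ===== VERDICT (by name: the statement is the Claim_ definition above) =====
theorem rare_route_spec : Claim_equal_rare_route := by
  intro graph node visited last_node _ _
  unfold Spec_rare_route
  exact main_eq graph node visited last_node
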